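-- pv_equiv track=rewrite | github.com/Axelitooo/adventofcode2023 | day12/main.py | springs_fit_clues
-- ===== SOURCE A (Python) =====
-- def springs_fit_clues(springs, clues):
-- 	group_size = 0
-- 	group_index = 0
-- 	for i, spring in enumerate(springs):
-- 		if spring == "#":
-- 			group_size += 1
-- 		if spring == "." or i == len(springs)-1:
-- 			if group_size > 0:
-- 				if group_index >= len(clues):
-- 					return False
-- 				if clues[group_index] != group_size:
-- 					return False
-- 				group_size = 0
-- 				group_index += 1
-- 	if group_index < len(clues):
-- 		return False
-- 	return True
-- ===== SOURCE B (Python) =====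
-- def springs_fit_clues(springs, clues):
--     # Split the spring list on "." into segments, take each segment's count of
--     # "#" entries, drop the zero counts, and compare with the clue list.
--     segments = []
--     cur = []
--     for s in springs:
--         if s == ".":
--             segments.append(cur)
--             cur = []
--         else:
--             cur.append(s)
--     segments.append(cur)
--     sizes = [seg.count("#") for seg in segments]
--     return [n for n in sizes if n > 0] == list(clues)
-- ===== Notes on version B (the rewrite author's own statement) =====
-- stated objective: simpler
-- what changed: Replaces A's incremental state machine (running group size, clue index, early returns, last-index special case) with a declarative pipeline: split the list on '.', count '#' per segment, drop zero counts, compare the whole list to clues.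
import Mathlib
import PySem

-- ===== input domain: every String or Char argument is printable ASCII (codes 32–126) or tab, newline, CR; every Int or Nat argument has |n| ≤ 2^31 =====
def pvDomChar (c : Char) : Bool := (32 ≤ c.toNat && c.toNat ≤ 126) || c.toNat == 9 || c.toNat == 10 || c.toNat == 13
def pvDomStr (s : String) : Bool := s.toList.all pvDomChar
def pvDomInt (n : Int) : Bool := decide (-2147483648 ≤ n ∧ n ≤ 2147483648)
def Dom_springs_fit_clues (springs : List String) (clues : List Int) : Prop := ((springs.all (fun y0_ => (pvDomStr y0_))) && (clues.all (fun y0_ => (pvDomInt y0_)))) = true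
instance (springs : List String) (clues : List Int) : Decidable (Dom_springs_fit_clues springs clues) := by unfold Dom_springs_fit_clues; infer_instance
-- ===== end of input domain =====

-- B splits the list on "." and compares per-segment '#' counts with the clues; simpler, same behaviour.


-- ===== PORT A =====
-- The loop of A, recursion over the remaining springs carrying (group_size, group_index).
-- Python's `i == len(springs)-1` (current element is the last one) is rendered as `rest = []`,
-- which is exact for the enumerate index test.
def sfcLoopA (clues : List Int) (gs gi : Int) : List String → Bool
  | [] => if gi < (clues.length : Int) then false else true
  | spring :: rest =>
      let gs' := if spring = "#" then gs + 1 else gs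
      if spring = "." ∨ rest = [] then
        if gs' > 0 then
          if gi ≥ (clues.length : Int) then false
          else if PySem.List.pyGet? clues gi ≠ some gs' then false
          else sfcLoopA clues 0 (gi + 1) rest
        else sfcLoopA clues gs' gi rest
      else sfcLoopA clues gs' gi rest

def springs_fit_clues (springs : List String) (clues : List Int) : Bool :=
  sfcLoopA clues 0 0 springs

-- ===== PORT B =====
-- B's split loop: accumulate the current segment, flush it on "." and once more at the end.
def sfcSplitB (cur : List String) (acc : List (List String)) : List String → List (List String)
  | [] => acc ++ [cur]
  | s :: rest =>
      if s = "." then sfcSplitB [] (acc ++ [cur]) rest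
      else sfcSplitB (cur ++ [s]) acc rest

def springs_fit_clues_alt (springs : List String) (clues : List Int) : Bool :=
  let segments := sfcSplitB [] [] springs
  let sizes := segments.map (fun seg => ((PySem.List.count seg "#" : Nat) : Int))
  decide ((sizes.filter (fun n => n > 0)) = clues)

-- ===== PRECONDITION & SPEC =====
def Spec_springs_fit_clues (springs : List String) (clues : List Int) (out : Bool) : Prop := out = springs_fit_clues_alt springs clues
instance (springs : List String) (clues : List Int) (out : Bool) : Decidable (Spec_springs_fit_clues springs clues out) := by unfold Spec_springs_fit_clues; infer_instance

-- ===== CLAIM (what is proved, stated in full; the proofs are below) =====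
def Claim_equal_springs_fit_clues : Prop := ∀ (springs : List String) (clues : List Int), Dom_springs_fit_clues springs clues → Spec_springs_fit_clues springs clues (springs_fit_clues springs clues)

-- ===== LEMMAS AND PROOFS =====

-- Positive group sizes as A produces them (flush at "." or at the last element).
def sfcSizes (gs : Int) : List String → List Int
  | [] => []
  | s :: rest =>
      let gs' := if s = "#" then gs + 1 else gs
      if s = "." ∨ rest = [] then
        if gs' > 0 then gs' :: sfcSizes 0 rest else sfcSizes 0 rest
      else sfcSizes gs' rest

-- Positive group sizes as B produces them (flush at "." and at the end of the list).
def sfcSizesB (gs : Int) : List String → List Int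
  | [] => if gs > 0 then [gs] else []
  | s :: rest =>
      if s = "." then
        if gs > 0 then gs :: sfcSizesB 0 rest else sfcSizesB 0 rest
      else sfcSizesB (if s = "#" then gs + 1 else gs) rest

lemma sfcSizes_cons (gs : Int) (s : String) (rest : List String) :
    sfcSizes gs (s :: rest)
      = (if s = "." ∨ rest = [] then
           if (if s = "#" then gs + 1 else gs) > 0 then
             (if s = "#" then gs + 1 else gs) :: sfcSizes 0 rest
           else sfcSizes 0 rest
         else sfcSizes (if s = "#" then gs + 1 else gs) rest) := rfl

lemma sfcSizesB_cons (gs : Int) (s : String) (rest : List String) :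
    sfcSizesB gs (s :: rest)
      = (if s = "." then
           if gs > 0 then gs :: sfcSizesB 0 rest else sfcSizesB 0 rest
         else sfcSizesB (if s = "#" then gs + 1 else gs) rest) := rfl

lemma sfcSizes_eq_sizesB : ∀ (rest : List String) (s : String) (gs : Int),
    sfcSizes gs (s :: rest) = sfcSizesB gs (s :: rest) := by
  intro rest
  induction rest with
  | nil =>
      intro s gs
      rw [sfcSizes_cons, sfcSizesB_cons]
      by_cases hdot : s = "."
      · have hnh : ¬ s = "#" := by rw [hdot]; decide
        simp [hdot, hnh, sfcSizes, sfcSizesB]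
      · simp [hdot, sfcSizes, sfcSizesB]
  | cons r rs ih =>
      intro s gs
      rw [sfcSizes_cons, sfcSizesB_cons]
      by_cases hdot : s = "."
      · subst hdot
        have hnh : ¬ ("." : String) = "#" := by decide
        rw [if_pos (Or.inl rfl), if_neg hnh, if_pos rfl, ih]
      · have hor : ¬ (s = "." ∨ r :: rs = []) := by simp [hdot]
        simp only [hor, if_neg, not_false_iff, hdot]
        exact ih r _

lemma sfcLoopA_cons (clues : List Int) (gs gi : Int) (s : String) (rest : List String) :
    sfcLoopA clues gs gi (s :: rest)
      = (if s = "." ∨ rest = [] then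
           if (if s = "#" then gs + 1 else gs) > 0 then
             if gi ≥ (clues.length : Int) then false
             else if PySem.List.pyGet? clues gi ≠ some (if s = "#" then gs + 1 else gs) then false
             else sfcLoopA clues 0 (gi + 1) rest
           else sfcLoopA clues (if s = "#" then gs + 1 else gs) gi rest
         else sfcLoopA clues (if s = "#" then gs + 1 else gs) gi rest) := rfl

lemma sfcLoopA_eq (clues : List Int) :
    ∀ (l : List String) (gs gi : Int), 0 ≤ gs → 0 ≤ gi →
      sfcLoopA clues gs gi l = decide (clues.drop gi.toNat = sfcSizes gs l) := by
  intro l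
  induction l with
  | nil =>
      intro gs gi hgs hgi
      simp only [sfcLoopA, sfcSizes]
      by_cases h : gi < (clues.length : Int)
      · have : clues.drop gi.toNat ≠ [] := by
          intro hc
          rw [List.drop_eq_nil_iff] at hc
          omega
        simp [h, this]
      · have : clues.drop gi.toNat = [] := by
          rw [List.drop_eq_nil_iff]
          omega
        simp [h, this]
  | cons s rest ih =>
      intro gs gi hgs hgi
      rw [sfcLoopA_cons, sfcSizes_cons]
      have hgs'0 : 0 ≤ (if s = "#" then gs + 1 else gs) := by split <;> omega
      generalize hg : (if s = "#" then gs + 1 else gs) = gs' at hgs'0 ⊢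
      by_cases hc : s = "." ∨ rest = []
      · rw [if_pos hc, if_pos hc]
        by_cases hpos : gs' > 0
        · rw [if_pos hpos, if_pos hpos]
          by_cases hge : gi ≥ (clues.length : Int)
          · have hdrop : clues.drop gi.toNat = [] := by
              rw [List.drop_eq_nil_iff]; omega
            rw [if_pos hge, hdrop]
            simp
          · rw [if_neg hge]
            have hlt : gi.toNat < clues.length := by omega
            have hdrop : clues.drop gi.toNat = clues[gi.toNat] :: clues.drop (gi.toNat + 1) :=
              List.drop_eq_getElem_cons hlt
            have hget : PySem.List.pyGet? clues gi = some (clues[gi.toNat]) := by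
              have h1 : PySem.List.pyGet? clues ((gi.toNat : Nat) : Int) = clues[gi.toNat]? :=
                PySem.List.pyGet?_natCast clues gi.toNat
              rw [show ((gi.toNat : Nat) : Int) = gi by omega] at h1
              rw [h1, List.getElem?_eq_getElem hlt]
            rw [hget, hdrop]
            by_cases heq : clues[gi.toNat] = gs'
            · have hnn : ¬ (some clues[gi.toNat] ≠ some gs') := by simp [heq]
              rw [if_neg hnn, ih 0 (gi + 1) le_rfl (by omega),
                show (gi + 1).toNat = gi.toNat + 1 by omega]
              simp [heq]
            · have hnn : (some clues[gi.toNat] ≠ some gs') := by simp [heq]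
              rw [if_pos hnn]
              have hne : ¬ (List.drop gi.toNat clues = gs' :: sfcSizes 0 rest) := by
                rw [hdrop]
                intro h
                exact heq (List.cons_eq_cons.mp h).1
              simp [hne]
        · rw [if_neg hpos, if_neg hpos]
          have hz : gs' = 0 := by omega
          rw [hz]
          exact ih 0 gi le_rfl hgi
      · rw [if_neg hc, if_neg hc]
        exact ih gs' gi hgs'0 hgi

lemma sfcCount_append (cur : List String) (s : String) :
    ((PySem.List.count (cur ++ [s]) "#" : Nat) : Int)
      = (if s = "#" then ((PySem.List.count cur "#" : Nat) : Int) + 1 else ((PySem.List.count cur "#" : Nat) : Int)) := by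
  simp only [PySem.List.count_eq, List.count_append, List.count_singleton]
  by_cases h : s = "#"
  · simp [h]
  · have h2 : ¬ "#" = s := fun e => h e.symm
    simp [h, h2]

lemma sfcSplitB_eq (l : List String) :
    ∀ (cur : List String) (acc : List (List String)),
      (((sfcSplitB cur acc l).map (fun seg => ((PySem.List.count seg "#" : Nat) : Int))).filter (fun n => n > 0))
        = ((acc.map (fun seg => ((PySem.List.count seg "#" : Nat) : Int))).filter (fun n => n > 0))
            ++ sfcSizesB ((PySem.List.count cur "#" : Nat) : Int) l := by
  induction l with
  | nil =>
      intro cur acc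
      simp only [sfcSplitB, sfcSizesB, List.map_append, List.filter_append, List.map_cons,
        List.map_nil, List.filter_cons, List.filter_nil]
      by_cases h : ((PySem.List.count cur "#" : Nat) : Int) > 0
      · simp [h]
      · simp [h]
  | cons s rest ih =>
      intro cur acc
      simp only [sfcSplitB, sfcSizesB]
      by_cases hdot : s = "."
      · simp only [hdot, if_pos, if_true]
        rw [ih]
        simp only [List.map_append, List.filter_append, List.map_cons, List.map_nil,
          List.filter_cons, List.filter_nil]
        by_cases hpos : ((PySem.List.count cur "#" : Nat) : Int) > 0
        · rw [if_pos hpos]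
          have hm : "#" ∈ cur := by
            rw [PySem.List.count_eq] at hpos
            have h0 : 0 < List.count "#" cur := by exact_mod_cast hpos
            exact List.count_pos_iff.mp h0
          simp [PySem.List.count_eq, hm]
        · have hz : ((PySem.List.count cur "#" : Nat) : Int) = 0 := by
            have : (0 : Int) ≤ ((PySem.List.count cur "#" : Nat) : Int) := Int.natCast_nonneg _
            omega
          rw [if_neg hpos]
          have hd : (decide (((PySem.List.count cur "#" : Nat) : Int) > 0)) = false := by
            rw [hz]
            decide
          have hm : "#" ∉ cur := by
            rw [PySem.List.count_eq] at hz
            have h0 : List.count "#" cur = 0 := by exact_mod_cast hz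
            exact List.count_eq_zero.mp h0
          simp [hd, hm]
      · simp only [hdot, if_neg, not_false_iff]
        rw [ih, sfcCount_append]

-- ===== VERDICT (by name: the statement is the Claim_ definition above) =====
theorem springs_fit_clues_spec : Claim_equal_springs_fit_clues := by
  intro springs clues _
  show springs_fit_clues springs clues = springs_fit_clues_alt springs clues
  rw [springs_fit_clues, springs_fit_clues_alt]
  rw [sfcLoopA_eq clues springs 0 0 le_rfl le_rfl]
  have h := sfcSplitB_eq springs [] []
  simp only [List.map_nil, List.filter_nil, List.nil_append] at h
  have hz : ((PySem.List.count ([] : List String) "#" : Nat) : Int) = 0 := by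
    simp [PySem.List.count_eq]
  rw [hz] at h
  simp only [h]
  cases springs with
  | nil => simp [sfcSizes, sfcSizesB, eq_comm]
  | cons s rest =>
      rw [← sfcSizes_eq_sizesB rest s 0]
      simp [eq_comm]
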